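-- pv_equiv track=rewrite | github.com/yummyPancake2607/hosting_service | backend/deployments/routes.py | _split_optional_env_vars
-- ===== SOURCE A (Python) =====
-- def _split_optional_env_vars(env_keys: set[str]) -> tuple[list[str], list[str]]:
--     optional_keys = {
--         "VITE_API_BASE_URL",
--         "VITE_API_URL",
--     }
--     optional = sorted(
--         [
--             key
--             for key in env_keys
--             if "SUPABASE" in key or key in optional_keys
--         ]
--     )
--     optional_set = set(optional)
--     required = sorted([key for key in env_keys if key not in optional_set])
--     return required, optional
-- ===== SOURCE B (Python) =====
-- def _split_optional_env_vars(env_keys: set[str]) -> tuple[list[str], list[str]]: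
--     required: list[str] = []
--     optional: list[str] = []
--     for key in env_keys:
--         target = (
--             optional
--             if "SUPABASE" in key or key in ("VITE_API_BASE_URL", "VITE_API_URL")
--             else required
--         )
--         lo, hi = 0, len(target)
--         while lo < hi:
--             mid = (lo + hi) // 2
--             if target[mid] < key:
--                 lo = mid + 1
--             else:
--                 hi = mid
--         target.insert(lo, key)
--     return required, optional
-- ===== Notes on version B (the rewrite author's own statement) =====
-- stated objective: alternative
-- what changed: No call to sorted() at all: B scans the unsorted input once and places each key directly at its ordered position in the required or optional list, locating the position by a hand-written binary search (online binary-insertion sort into two lists), instead of A's two filtered comprehensions each passed to sorted() plus a derived membership set.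
import Mathlib
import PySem

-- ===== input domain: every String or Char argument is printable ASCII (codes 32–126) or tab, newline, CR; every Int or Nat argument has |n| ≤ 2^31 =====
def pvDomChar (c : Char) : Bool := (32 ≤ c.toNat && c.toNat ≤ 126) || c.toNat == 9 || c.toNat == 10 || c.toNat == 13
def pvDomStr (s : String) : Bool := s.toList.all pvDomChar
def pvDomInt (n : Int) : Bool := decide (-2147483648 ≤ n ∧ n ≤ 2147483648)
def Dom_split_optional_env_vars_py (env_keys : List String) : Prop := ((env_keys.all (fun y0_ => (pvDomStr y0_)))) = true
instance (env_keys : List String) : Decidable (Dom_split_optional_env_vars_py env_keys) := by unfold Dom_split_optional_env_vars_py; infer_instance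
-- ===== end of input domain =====

-- B computes each sorted half without calling sorted(): it scans the unsorted input once and
-- inserts each key at its ordered position (found by a hand-written binary search) in required
-- or optional — an online binary-insertion sort into two lists.


-- ===== PORT A =====
def split_optional_env_vars_py (env_keys : List String) : List String × List String :=
  let optional_keys : PySem.Set String := PySem.Set.ofList ["VITE_API_BASE_URL", "VITE_API_URL"]
  let optional := PySem.List.sorted
    (env_keys.filter (fun key => PySem.Str.isIn "SUPABASE" key || PySem.Set.contains optional_keys key))
    (fun x => x) false
  let optional_set : PySem.Set String := PySem.Set.ofList optional
  let required := PySem.List.sorted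
    (env_keys.filter (fun key => !(PySem.Set.contains optional_set key)))
    (fun x => x) false
  (required, optional)

-- ===== PORT B =====
-- Source B's while-loop: binary search for the insertion point of key in target[lo:hi]
-- (target[mid] is always in range as called; List.getD matches it there)
def pvBisect (target : List String) (key : String) (lo hi : Nat) : Nat :=
  if _h : lo < hi then
    let mid := (lo + hi) / 2
    if target.getD mid "" < key then pvBisect target key (mid + 1) hi
    else pvBisect target key lo mid
  else lo
termination_by hi - lo
decreasing_by
  · have h1 : lo ≤ (lo + hi) / 2 := (Nat.le_div_iff_mul_le (by norm_num)).mpr (by omega)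
    omega
  · have h2 : (lo + hi) / 2 < hi := Nat.div_lt_of_lt_mul (by omega)
    omega

def split_optional_env_vars_py_alt (env_keys : List String) : List String × List String :=
  env_keys.foldl
    (fun acc key =>
      if PySem.Str.isIn "SUPABASE" key || key == "VITE_API_BASE_URL" || key == "VITE_API_URL" then
        (acc.1, PySem.List.insert acc.2 ((pvBisect acc.2 key 0 acc.2.length : Nat) : Int) key)
      else
        (PySem.List.insert acc.1 ((pvBisect acc.1 key 0 acc.1.length : Nat) : Int) key, acc.2))
    ([], [])

-- ===== PRECONDITION & SPEC =====
def Spec_split_optional_env_vars_py (env_keys : List String) (out : List String × List String) : Prop := out = split_optional_env_vars_py_alt env_keys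
instance (env_keys : List String) (out : List String × List String) : Decidable (Spec_split_optional_env_vars_py env_keys out) := by unfold Spec_split_optional_env_vars_py; infer_instance

-- ===== CLAIM (what is proved, stated in full; the proofs are below) =====
def Claim_equal_split_optional_env_vars_py : Prop := ∀ (env_keys : List String), Dom_split_optional_env_vars_py env_keys → Spec_split_optional_env_vars_py env_keys (split_optional_env_vars_py env_keys)

-- ===== LEMMAS AND PROOFS =====

-- the substring/name test both programs use to call a key optional
def pvOpt (key : String) : Bool :=
  PySem.Str.isIn "SUPABASE" key || key == "VITE_API_BASE_URL" || key == "VITE_API_URL"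

-- A's comprehension predicate (substring test plus set membership) is pvOpt
theorem pv_pred_eq (k : String) :
    (PySem.Str.isIn "SUPABASE" k ||
      PySem.Set.contains (PySem.Set.ofList ["VITE_API_BASE_URL", "VITE_API_URL"]) k) = pvOpt k := by
  have h2 : PySem.Set.ofList ["VITE_API_BASE_URL", "VITE_API_URL"]
      = ["VITE_API_BASE_URL", "VITE_API_URL"] := by decide
  rw [h2, Bool.eq_iff_iff]
  simp [pvOpt, PySem.Set.contains_eq_listContains, or_assoc]

-- for a key of the input, membership in set(optional) is exactly pvOpt
theorem pv_mem_optional (env_keys : List String) (key : String) (hk : key ∈ env_keys) :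
    PySem.Set.contains
      (PySem.Set.ofList (PySem.List.sorted (env_keys.filter pvOpt) (fun x => x) false)) key
      = pvOpt key := by
  cases h : pvOpt key
  · refine Bool.eq_false_iff.mpr (fun hc => ?_)
    have hm := (PySem.Set.contains_iff _ _).mp hc
    rw [PySem.Set.mem_ofList, PySem.List.mem_sorted, List.mem_filter] at hm
    rw [h] at hm
    exact Bool.false_ne_true hm.2
  · refine (PySem.Set.contains_iff _ _).mpr ?_
    rw [PySem.Set.mem_ofList, PySem.List.mem_sorted, List.mem_filter]
    exact ⟨hk, h⟩

-- abstract one-element insertion before the first element ≥ key (proof-side model of Source B's insert)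
def pvInsort (key : String) : List String → List String
  | [] => [key]
  | x :: xs => if x < key then x :: pvInsort key xs else key :: x :: xs

theorem pv_insort_perm (key : String) (l : List String) : (pvInsort key l).Perm (key :: l) := by
  induction l with
  | nil => simp [pvInsort]
  | cons x xs ih =>
    by_cases h : x < key
    · simp only [pvInsort, if_pos h]
      exact (ih.cons x).trans (List.Perm.swap key x xs)
    · rw [pvInsort, if_neg h]

theorem pv_mem_insort {key y : String} {l : List String} (h : y ∈ pvInsort key l) :
    y = key ∨ y ∈ l := by
  have := (pv_insort_perm key l).mem_iff.mp h
  simpa using this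

theorem pv_insort_pairwise (key : String) (l : List String)
    (h : l.Pairwise (· ≤ ·)) : (pvInsort key l).Pairwise (· ≤ ·) := by
  induction l with
  | nil => simp [pvInsort]
  | cons x xs ih =>
    rw [List.pairwise_cons] at h
    by_cases hx : x < key
    · simp only [pvInsort, if_pos hx]
      rw [List.pairwise_cons]
      refine ⟨fun y hy => ?_, ih h.2⟩
      rcases pv_mem_insort hy with rfl | hy'
      · exact le_of_lt hx
      · exact h.1 y hy'
    · simp only [pvInsort, if_neg hx]
      rw [List.pairwise_cons]
      refine ⟨fun y hy => ?_, List.pairwise_cons.mpr h⟩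
      rcases List.mem_cons.mp hy with rfl | hy'
      · exact le_of_not_gt hx
      · exact le_trans (le_of_not_gt hx) (h.1 y hy')

-- pvInsort splits the list at the first element ≥ key
theorem pv_insort_eq_takeWhile (key : String) (l : List String) :
    pvInsort key l
      = l.takeWhile (fun x => decide (x < key)) ++ key :: l.dropWhile (fun x => decide (x < key)) := by
  induction l with
  | nil => simp [pvInsort]
  | cons x xs ih =>
    simp only [pvInsort, List.takeWhile_cons, List.dropWhile_cons]
    by_cases h : x < key
    · rw [if_pos h, ih]
      simp only [h, decide_true, if_true, List.cons_append]
    · rw [if_neg h]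
      simp only [h, decide_false, Bool.false_eq_true, if_false, List.nil_append]

-- elements strictly inside the takeWhile prefix satisfy the predicate
theorem pv_tw_sat (p : String → Bool) (l : List String) (i : Nat) (h1 : i < l.length)
    (h2 : i < (l.takeWhile p).length) : p l[i] := by
  have hm := List.mem_takeWhile_imp (List.getElem_mem h2)
  rwa [List.IsPrefix.getElem (List.takeWhile_prefix p) h2] at hm

-- dropping the takeWhile prefix lands on l itself
theorem pv_drop_takeWhile (p : String → Bool) (l : List String) :
    l.drop (l.takeWhile p).length = l.dropWhile p := by
  have hsplit := List.takeWhile_append_dropWhile (p := p) (l := l)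
  calc l.drop (l.takeWhile p).length
      = (l.takeWhile p ++ l.dropWhile p).drop (l.takeWhile p).length := by rw [hsplit]
    _ = l.dropWhile p := by rw [List.drop_left]

-- the element just past the takeWhile prefix fails the predicate
theorem pv_tw_fail (p : String → Bool) (l : List String)
    (h : (l.takeWhile p).length < l.length) : ¬ p (l[(l.takeWhile p).length]) := by
  have hne : l.dropWhile p ≠ [] := by
    intro hnil
    have := congrArg List.length (List.takeWhile_append_dropWhile (p := p) (l := l))
    simp [hnil] at this
    omega
  have hne' : l.drop (l.takeWhile p).length ≠ [] := by
    rw [pv_drop_takeWhile]; exact hne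
  have hg := List.head_drop hne'
  have e1 := List.head_eq_getElem hne'
  have e2 := List.head_eq_getElem hne
  have e3 : (l.drop (l.takeWhile p).length)[0]'(List.length_pos_iff.mpr hne')
      = (l.dropWhile p)[0]'(List.length_pos_iff.mpr hne) :=
    List.getElem_of_eq (pv_drop_takeWhile p l) _
  have hfail := List.head_dropWhile_not p hne
  rw [e2] at hfail
  rw [← hg, e1, e3]
  simp [hfail]

-- the binary search keeps its bracketing invariant on a sorted list
theorem pv_bisect_spec (l : List String) (key : String) (hs : l.Pairwise (· ≤ ·)) :
    ∀ (n lo hi : Nat), hi - lo ≤ n → lo ≤ hi → hi ≤ l.length →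
      (∀ i, (hi' : i < l.length) → i < lo → l[i] < key) →
      (∀ i, (hi' : i < l.length) → hi ≤ i → ¬ l[i] < key) →
      (pvBisect l key lo hi ≤ l.length ∧
       (∀ i, (hi' : i < l.length) → i < pvBisect l key lo hi → l[i] < key) ∧
       (∀ i, (hi' : i < l.length) → pvBisect l key lo hi ≤ i → ¬ l[i] < key)) := by
  have hmono : ∀ i j, (hi : i < l.length) → (hj : j < l.length) → i < j → l[i] ≤ l[j] :=
    fun i j hi hj hij => List.pairwise_iff_getElem.mp hs i j hi hj hij
  intro n
  induction n with
  | zero =>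
    intro lo hi hgap hle hlen Hlo Hhi
    have : lo = hi := by omega
    subst this
    rw [pvBisect, dif_neg (lt_irrefl lo)]
    exact ⟨by omega, fun i hi' hlt => Hlo i hi' hlt, fun i hi' hge => Hhi i hi' hge⟩
  | succ n ih =>
    intro lo hi hgap hle hlen Hlo Hhi
    by_cases hlt : lo < hi
    · have hmidlo : lo ≤ (lo + hi) / 2 := (Nat.le_div_iff_mul_le (by norm_num)).mpr (by omega)
      have hmidhi : (lo + hi) / 2 < hi := Nat.div_lt_of_lt_mul (by omega)
      set mid := (lo + hi) / 2 with hmid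
      have hmlen : mid < l.length := by omega
      have hgetD : l.getD mid "" = l[mid] := List.getD_eq_getElem l "" hmlen
      rw [pvBisect, dif_pos hlt]
      simp only [← hmid, hgetD]
      by_cases hc : l[mid] < key
      · rw [if_pos hc]
        refine ih (mid + 1) hi (by omega) (by omega) hlen (fun i hi' hlt' => ?_) Hhi
        rcases Nat.lt_succ_iff_lt_or_eq.mp hlt' with h' | h'
        · exact lt_of_le_of_lt (le_of_lt (lt_of_lt_of_le h' (le_refl mid)) |> fun hij =>
            hmono i mid hi' hmlen h') hc
        · subst h'; exact hc
      · rw [if_neg hc]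
        refine ih lo mid (by omega) (by omega) (by omega) Hlo (fun i hi' hge => ?_)
        rcases Nat.eq_or_lt_of_le hge with h' | h'
        · subst h'; exact hc
        · exact fun hik => hc (lt_of_le_of_lt (hmono mid i hmlen hi' h') hik)
    · have : lo = hi := by omega
      subst this
      rw [pvBisect, dif_neg (lt_irrefl lo)]
      exact ⟨by omega, fun i hi' hlt' => Hlo i hi' hlt', fun i hi' hge => Hhi i hi' hge⟩

-- on a sorted list the search from [0, len) returns the length of the takeWhile prefix
theorem pv_bisect_eq (l : List String) (key : String) (hs : l.Pairwise (· ≤ ·)) :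
    pvBisect l key 0 l.length = (l.takeWhile (fun x => decide (x < key))).length := by
  obtain ⟨h1, h2, h3⟩ := pv_bisect_spec l key hs l.length 0 l.length (by omega) (by omega)
    (le_refl _) (fun i _ h => absurd h (Nat.not_lt_zero i)) (fun i hi' hge => by omega)
  set r := pvBisect l key 0 l.length with hr
  set T := (l.takeWhile (fun x => decide (x < key))).length with hT
  have hTle : T ≤ l.length := by rw [hT]; exact List.IsPrefix.length_le (List.takeWhile_prefix _)
  rcases lt_trichotomy r T with h | h | h
  · exfalso
    have hrlen : r < l.length := by omega
    have := pv_tw_sat (fun x => decide (x < key)) l r hrlen (by omega)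
    simp only [decide_eq_true_eq] at this
    exact h3 r hrlen (le_refl r) this
  · exact h
  · exfalso
    have hTlen : T < l.length := by omega
    have := pv_tw_fail (fun x => decide (x < key)) l (by omega)
    simp only [decide_eq_true_eq] at this
    exact this (h2 T hTlen h)

-- on a sorted list, Source B's bisect-and-insert equals abstract insertion
theorem pv_insortB_eq (key : String) (l : List String) (hs : l.Pairwise (· ≤ ·)) :
    PySem.List.insert l ((pvBisect l key 0 l.length : Nat) : Int) key = pvInsort key l := by
  rw [pv_bisect_eq l key hs]
  set T := (l.takeWhile (fun x => decide (x < key))).length with hT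
  have hTle : T ≤ l.length := by rw [hT]; exact List.IsPrefix.length_le (List.takeWhile_prefix _)
  rw [PySem.List.insert_natCast l T key hTle, pv_insort_eq_takeWhile]
  congr 1
  · rw [hT, ← List.prefix_iff_eq_take.mp (List.takeWhile_prefix _)]
  · rw [hT, pv_drop_takeWhile]

-- B's fold splits into two independent insertion folds over the filtered halves
theorem pv_fold_split (l : List String) (req opt : List String) :
    l.foldl (fun acc key =>
        if PySem.Str.isIn "SUPABASE" key || key == "VITE_API_BASE_URL" || key == "VITE_API_URL" then
          (acc.1, PySem.List.insert acc.2 ((pvBisect acc.2 key 0 acc.2.length : Nat) : Int) key)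
        else
          (PySem.List.insert acc.1 ((pvBisect acc.1 key 0 acc.1.length : Nat) : Int) key, acc.2)) (req, opt)
      = ((l.filter (fun k => !pvOpt k)).foldl
           (fun a k => PySem.List.insert a ((pvBisect a k 0 a.length : Nat) : Int) k) req,
         (l.filter pvOpt).foldl
           (fun a k => PySem.List.insert a ((pvBisect a k 0 a.length : Nat) : Int) k) opt) := by
  induction l generalizing req opt with
  | nil => simp
  | cons k t ih =>
    simp only [List.foldl_cons, List.filter_cons]
    rw [show (PySem.Str.isIn "SUPABASE" k || k == "VITE_API_BASE_URL" || k == "VITE_API_URL")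
        = pvOpt k from rfl]
    cases h : pvOpt k
    · simp only [Bool.not_false, reduceIte]
      rw [ih]
      simp
    · simp only [Bool.not_true, reduceIte]
      rw [ih]
      simp

-- from a sorted accumulator the bisect-insert fold is the abstract insertion fold
theorem pv_foldB_eq_fold (l : List String) (acc : List String) (h : acc.Pairwise (· ≤ ·)) :
    l.foldl (fun a k => PySem.List.insert a ((pvBisect a k 0 a.length : Nat) : Int) k) acc
      = l.foldl (fun a k => pvInsort k a) acc := by
  induction l generalizing acc with
  | nil => rfl
  | cons k t ih =>
    simp only [List.foldl_cons]
    rw [pv_insortB_eq k acc h]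
    exact ih (pvInsort k acc) (pv_insort_pairwise k acc h)

theorem pv_fold_insort_perm (l acc : List String) :
    (l.foldl (fun a k => pvInsort k a) acc).Perm (acc ++ l) := by
  induction l generalizing acc with
  | nil => simp
  | cons k t ih =>
    simp only [List.foldl_cons]
    refine (ih (pvInsort k acc)).trans ?_
    exact ((pv_insort_perm k acc).append_right t).trans List.perm_middle.symm

theorem pv_fold_insort_pairwise (l acc : List String) (h : acc.Pairwise (· ≤ ·)) :
    (l.foldl (fun a k => pvInsort k a) acc).Pairwise (· ≤ ·) := by
  induction l generalizing acc with
  | nil => exact h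
  | cons k t ih => exact ih (pvInsort k acc) (pv_insort_pairwise k acc h)

-- the insertion fold from the empty list IS sorted(l)
theorem pv_fold_insort_eq_sorted (l : List String) :
    PySem.List.sorted l (fun x => x) false = l.foldl (fun a k => pvInsort k a) [] := by
  apply PySem.List.sorted_id_eq_of_perm_of_pairwise
  · simpa using pv_fold_insort_perm l []
  · exact pv_fold_insort_pairwise l [] (by simp)

-- ===== VERDICT (by name: the statement is the Claim_ definition above) =====
theorem split_optional_env_vars_py_spec : Claim_equal_split_optional_env_vars_py := by
  intro env_keys _
  unfold Spec_split_optional_env_vars_py split_optional_env_vars_py split_optional_env_vars_py_alt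
  rw [pv_fold_split]
  simp only
  rw [List.filter_congr (fun k _ => pv_pred_eq k)]
  rw [List.filter_congr (fun k hk => by rw [pv_mem_optional env_keys k hk] :
        ∀ k ∈ env_keys, (!PySem.Set.contains
          (PySem.Set.ofList (PySem.List.sorted (env_keys.filter pvOpt) (fun x => x) false)) k)
          = (!pvOpt k))]
  rw [pv_foldB_eq_fold _ [] (by simp), pv_foldB_eq_fold _ [] (by simp)]
  rw [pv_fold_insort_eq_sorted (env_keys.filter (fun k => !pvOpt k)),
      pv_fold_insort_eq_sorted (env_keys.filter pvOpt)]
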